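-- pv_equiv track=rewrite | github.com/keiners/adventofcode | 2020/day14/app.py | mask_number_with_float
-- ===== SOURCE A (Python) =====
-- def mask_number_with_float(number, mask):
--     masked_number = ""
--     for i,m in enumerate(mask):
--         if m == "0":
--             masked_number += number[i]
--         elif m == "1":
--             masked_number += "1"
--         else:
--             masked_number += "x"
--     return float_number(masked_number)
--
-- def float_number(number):
--     numbers = []
--     if "x" not in number:
--         return [number]
--     else:
--         x = number.index("x")
--         prefix = number[:x]
--         numbers += float_number(f"{prefix}0{number[x+1:]}")
--         numbers += float_number(f"{prefix}1{number[x+1:]}")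
--     return numbers
-- ===== SOURCE B (Python) =====
-- def mask_number_with_float(number, mask):
--     masked = ["x"] * len(mask)
--     for i, m in enumerate(mask):
--         if m == "0":
--             masked[i] = number[i]
--         elif m == "1":
--             masked[i] = "1"
--     idxs = [i for i, c in enumerate(masked) if c == "x"]
--     combos = [""]
--     for _ in idxs:
--         combos = [c + b for c in combos for b in "01"]
--     out = []
--     for c in combos:
--         cur = masked[:]
--         for i, b in zip(idxs, c):
--             cur[i] = b
--         out.append("".join(cur))
--     return out
-- ===== Notes on version B (the rewrite author's own statement) =====
-- stated objective: alternative
-- what changed: A expands the floating bits by binary recursion on the first 'x' of the masked string (re-scanning and re-slicing the string at every level); B is iterative: it collects the 'x' positions once, builds the list of all bit-strings by repeated extension (leftmost bit varying slowest), and substitutes each bit-string at those positions.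
import Mathlib
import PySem

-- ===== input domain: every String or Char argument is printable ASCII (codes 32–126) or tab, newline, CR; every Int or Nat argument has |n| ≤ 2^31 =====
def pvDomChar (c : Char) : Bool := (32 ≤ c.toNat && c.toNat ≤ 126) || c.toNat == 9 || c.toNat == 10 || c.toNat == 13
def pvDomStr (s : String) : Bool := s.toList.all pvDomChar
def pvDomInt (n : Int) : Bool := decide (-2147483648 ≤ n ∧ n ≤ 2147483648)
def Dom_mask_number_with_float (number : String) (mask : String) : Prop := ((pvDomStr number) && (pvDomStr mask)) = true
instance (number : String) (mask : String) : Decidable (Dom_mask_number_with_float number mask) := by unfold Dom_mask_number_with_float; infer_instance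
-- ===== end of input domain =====

-- B replaces A's binary recursion on the first 'x' of the masked string by an
-- iterative expansion: collect the 'x' positions once, build all bit strings by
-- repeated extension, substitute each at those positions (objective: alternative).
-- Strings are modelled as List Char and wrapped with String.ofList at the end.

-- ===== PORT A =====
-- loop body of "for i,m in enumerate(mask): masked_number += …"; number[i] = pyGetD (in range under Pre_)
def pvStepA (number : List Char) (acc : List Char) (im : Int × Char) : List Char :=
  if im.2 = '0' then acc ++ [PySem.List.pyGetD number im.1 ' ']
  else if im.2 = '1' then acc ++ ['1']
  else acc ++ ['x']

def pvMaskedA (number : List Char) (mask : List Char) : List Char :=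
  (PySem.List.enumerate mask).foldl (pvStepA number) []

-- termination helpers for the port's recursion (cited in decreasing_by)
lemma pvSplit (s : List Char) (h : 'x' ∈ s) :
    s = s.take (s.idxOf 'x') ++ 'x' :: s.drop (s.idxOf 'x' + 1) := by
  have hk : s.idxOf 'x' < s.length := List.idxOf_lt_length_of_mem h
  conv_lhs => rw [← List.take_append_drop (s.idxOf 'x') s]
  rw [List.drop_eq_getElem_cons hk, List.getElem_idxOf hk]

lemma pvCount_lt (s : List Char) (h : 'x' ∈ s) (b : Char) (hb : b ≠ 'x') :
    (s.take (s.idxOf 'x') ++ b :: s.drop (s.idxOf 'x' + 1)).count 'x' < s.count 'x' := by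
  conv_rhs => rw [pvSplit s h]
  simp [List.count_append, hb]

-- float_number: '"x" not in number' = membership test; number.index("x") with 'x'
-- present = idxOf; number[:x] / number[x+1:] with a Nat bound are take / drop
-- (PySem.List.slice_to_natCast / slice_from_natCast)
def pvFloatNumber (s : List Char) : List (List Char) :=
  if h : 'x' ∈ s then
    pvFloatNumber (s.take (s.idxOf 'x') ++ '0' :: s.drop (s.idxOf 'x' + 1)) ++
    pvFloatNumber (s.take (s.idxOf 'x') ++ '1' :: s.drop (s.idxOf 'x' + 1))
  else [s]
termination_by s.count 'x'
decreasing_by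
  · exact pvCount_lt s h '0' (by decide)
  · exact pvCount_lt s h '1' (by decide)

def mask_number_with_float (number : String) (mask : String) : List String :=
  (pvFloatNumber (pvMaskedA number.toList mask.toList)).map (fun l => String.ofList l)

-- ===== PORT B =====
-- loop body of "for i, m in enumerate(mask): … masked[i] = …"
def pvStepB (number : List Char) (cur : List Char) (im : Int × Char) : List Char :=
  if im.2 = '0' then PySem.List.pySetD cur im.1 (PySem.List.pyGetD number im.1 ' ')
  else if im.2 = '1' then PySem.List.pySetD cur im.1 '1'
  else cur

-- masked = ["x"] * len(mask), then the loop mutates it in place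
def pvMaskedB (number : List Char) (mask : List Char) : List Char :=
  (PySem.List.enumerate mask).foldl (pvStepB number) (List.replicate mask.length 'x')

-- idxs = [i for i, c in enumerate(masked) if c == "x"]
def pvIdxFun (ic : Int × Char) : Option Int := if ic.2 = 'x' then some ic.1 else none

def pvIdxs (masked : List Char) : List Int :=
  (PySem.List.enumerate masked).filterMap pvIdxFun

-- combos = [c + b for c in combos for b in "01"]
def pvExtend (combos : List (List Char)) : List (List Char) :=
  combos.flatMap (fun c => ['0', '1'].map (fun b => c ++ [b]))

-- combos = [""]; for _ in idxs: combos = pvExtend combos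
def pvCombos (idxs : List Int) : List (List Char) :=
  idxs.foldl (fun combos _ => pvExtend combos) [[]]

-- cur[i] = b
def pvSetStep (cur : List Char) (ib : Int × Char) : List Char :=
  PySem.List.pySetD cur ib.1 ib.2

-- cur = masked[:]; for i, b in zip(idxs, c): cur[i] = b; "".join(cur)
def pvPlace (masked : List Char) (idxs : List Int) (c : List Char) : List Char :=
  (idxs.zip c).foldl pvSetStep masked

def mask_number_with_float_alt (number : String) (mask : String) : List String :=
  let masked := pvMaskedB number.toList mask.toList
  let idxs := pvIdxs masked
  (pvCombos idxs).map (fun c => String.ofList (pvPlace masked idxs c))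

-- ===== PRECONDITION & SPEC =====
-- Pre_ excludes exactly the inputs where Python A raises IndexError: a '0' in the
-- mask at a position i with i ≥ len(number) (number[i] is out of range).
def Pre_mask_number_with_float (number : String) (mask : String) : Prop :=
  ∀ p ∈ PySem.List.enumerate mask.toList, p.2 = '0' → p.1 < (number.toList.length : Int)
instance (number : String) (mask : String) : Decidable (Pre_mask_number_with_float number mask) := by
  unfold Pre_mask_number_with_float; infer_instance

def pvWitness_mask_number_with_float : String × String := ("1010", "01xX")

def Spec_mask_number_with_float (number : String) (mask : String) (out : List String) : Prop := out = mask_number_with_float_alt number mask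
instance (number : String) (mask : String) (out : List String) : Decidable (Spec_mask_number_with_float number mask out) := by unfold Spec_mask_number_with_float; infer_instance

-- ===== CLAIM (what is proved, stated in full; the proofs are below) =====
def Claim_equal_mask_number_with_float : Prop := ∀ (number : String) (mask : String), Dom_mask_number_with_float number mask → Pre_mask_number_with_float number mask → Spec_mask_number_with_float number mask (mask_number_with_float number mask)

-- ===== LEMMAS AND PROOFS =====

-- the common value of the two masked-string builders
def pvMaskedFun (number : List Char) (im : Int × Char) : Char :=
  if im.2 = '0' then PySem.List.pyGetD number im.1 ' '
  else if im.2 = '1' then '1' else 'x'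

lemma pvMaskedA_go (number : List Char) (l : List (Int × Char)) (acc : List Char) :
    l.foldl (pvStepA number) acc = acc ++ l.map (pvMaskedFun number) := by
  induction l generalizing acc with
  | nil => simp
  | cons p t ih =>
    rw [List.foldl_cons, List.map_cons, ih]
    unfold pvStepA pvMaskedFun
    split_ifs <;> simp

lemma pvMaskedA_eq (number mask : List Char) :
    pvMaskedA number mask = (PySem.List.enumerate mask).map (pvMaskedFun number) := by
  unfold pvMaskedA
  rw [pvMaskedA_go]
  simp

lemma pvListSet_at {α : Type} (pre suf : List α) (a b : α) :
    (pre ++ a :: suf).set pre.length b = pre ++ b :: suf := by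
  induction pre with
  | nil => rfl
  | cons x t ih => simp only [List.cons_append, List.length_cons, List.set_cons_succ, ih]

lemma pvMaskedB_go (number : List Char) (ms : List Char) (pre : List Char) :
    (PySem.List.enumerate ms (pre.length : Int)).foldl (pvStepB number)
      (pre ++ List.replicate ms.length 'x')
    = pre ++ (PySem.List.enumerate ms (pre.length : Int)).map (pvMaskedFun number) := by
  induction ms generalizing pre with
  | nil => simp
  | cons m t ih =>
    rw [PySem.List.enumerate_cons, List.foldl_cons, List.map_cons]
    have hrep : List.replicate (m :: t).length 'x' = 'x' :: List.replicate t.length 'x' := rfl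
    rw [hrep]
    have hstep : pvStepB number (pre ++ 'x' :: List.replicate t.length 'x') ((pre.length : Int), m)
        = pre ++ pvMaskedFun number ((pre.length : Int), m) :: List.replicate t.length 'x' := by
      unfold pvStepB pvMaskedFun
      split_ifs <;> first
        | rfl
        | rw [PySem.List.pySetD_natCast, pvListSet_at]
    rw [hstep]
    have hlen : (pre.length : Int) + 1
        = (((pre ++ [pvMaskedFun number ((pre.length : Int), m)]).length : Int)) := by
      simp
    rw [List.append_cons pre (pvMaskedFun number ((pre.length : Int), m)) (List.replicate t.length 'x'),
        List.append_cons pre (pvMaskedFun number ((pre.length : Int), m))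
          ((PySem.List.enumerate t ((pre.length : Int) + 1)).map (pvMaskedFun number)),
        hlen, ih]

lemma pvMaskedB_eq (number mask : List Char) :
    pvMaskedB number mask = (PySem.List.enumerate mask).map (pvMaskedFun number) := by
  unfold pvMaskedB
  have h := pvMaskedB_go number mask []
  simpa using h

-- all bit strings of length k, leftmost bit varying slowest
def pvAllCons : Nat → List (List Char)
  | 0 => [[]]
  | k + 1 => (pvAllCons k).map ('0' :: ·) ++ (pvAllCons k).map ('1' :: ·)

lemma pvExtend_allCons (k : Nat) : pvExtend (pvAllCons k) = pvAllCons (k + 1) := by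
  induction k with
  | zero => rfl
  | succ k ih =>
    unfold pvExtend at ih ⊢
    show ((pvAllCons k).map ('0' :: ·) ++ (pvAllCons k).map ('1' :: ·)).flatMap _ = _
    rw [List.flatMap_append, List.flatMap_map, List.flatMap_map]
    have h0 : (fun c : List Char => ['0', '1'].map (fun b => ('0' :: c) ++ [b]))
        = (fun c : List Char => (['0', '1'].map (fun b => c ++ [b])).map ('0' :: ·)) := by
      funext c; simp
    have h1 : (fun c : List Char => ['0', '1'].map (fun b => ('1' :: c) ++ [b]))
        = (fun c : List Char => (['0', '1'].map (fun b => c ++ [b])).map ('1' :: ·)) := by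
      funext c; simp
    rw [h0, h1, ← List.map_flatMap, ← List.map_flatMap, ih]
    rfl

lemma pvCombos_go (idxs : List Int) (k : Nat) :
    idxs.foldl (fun combos _ => pvExtend combos) (pvAllCons k) = pvAllCons (k + idxs.length) := by
  induction idxs generalizing k with
  | nil => simp
  | cons i t ih =>
    rw [List.foldl_cons, pvExtend_allCons, ih]
    congr 1
    simp only [List.length_cons]
    omega

lemma pvCombos_eq (idxs : List Int) : pvCombos idxs = pvAllCons idxs.length := by
  unfold pvCombos
  have h := pvCombos_go idxs 0
  simpa using h

lemma pvIdxs_no_x (t : Int) (u : List Char) (hu : 'x' ∉ u) :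
    (PySem.List.enumerate u t).filterMap pvIdxFun = [] := by
  rw [List.filterMap_eq_nil_iff]
  intro p hp
  rcases (PySem.List.mem_enumerate_iff _ _ _).1 hp with ⟨k, hk, rfl⟩
  have hne : u[k] ≠ 'x' := fun hx => hu (hx ▸ List.getElem_mem hk)
  simp [pvIdxFun, hne]

lemma pvIdxs_split (t : Int) (pre suf : List Char) (hp : 'x' ∉ pre) :
    (PySem.List.enumerate (pre ++ 'x' :: suf) t).filterMap pvIdxFun
      = (t + pre.length) :: (PySem.List.enumerate suf (t + pre.length + 1)).filterMap pvIdxFun := by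
  rw [PySem.List.enumerate_append, List.filterMap_append, pvIdxs_no_x t pre hp,
      PySem.List.enumerate_cons, List.filterMap_cons]
  simp [pvIdxFun]

lemma pvIdxs_split_b (t : Int) (pre suf : List Char) (hp : 'x' ∉ pre) (b : Char) (hb : b ≠ 'x') :
    (PySem.List.enumerate (pre ++ b :: suf) t).filterMap pvIdxFun
      = (PySem.List.enumerate suf (t + pre.length + 1)).filterMap pvIdxFun := by
  rw [PySem.List.enumerate_append, List.filterMap_append, pvIdxs_no_x t pre hp,
      PySem.List.enumerate_cons, List.filterMap_cons]
  simp [pvIdxFun, hb]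

lemma pvPlace_cons (masked : List Char) (p : Int) (R : List Int) (b : Char) (c : List Char) :
    pvPlace masked (p :: R) (b :: c) = pvPlace (PySem.List.pySetD masked p b) R c := rfl

lemma pvSet_at (pre suf : List Char) (a b : Char) :
    PySem.List.pySetD (pre ++ a :: suf) ((pre.length : Int)) b = pre ++ b :: suf := by
  rw [PySem.List.pySetD_natCast, pvListSet_at]

lemma pvNotMemTakeIdxOf (s : List Char) : 'x' ∉ s.take (s.idxOf 'x') := by
  induction s with
  | nil => simp
  | cons a t ih =>
    by_cases ha : a = 'x'
    · subst ha; simp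
    · have hbeq : ((a == 'x') : Bool) = false := by simp [ha]
      simp [List.idxOf_cons, hbeq, List.take_succ_cons, Ne.symm ha, ih]

theorem pvMain (s : List Char) :
    pvFloatNumber s = (pvCombos (pvIdxs s)).map (fun c => pvPlace s (pvIdxs s) c) := by
  by_cases h : 'x' ∈ s
  · rw [pvFloatNumber, dif_pos h]
    set pre := s.take (s.idxOf 'x') with hpreDef
    set suf := s.drop (s.idxOf 'x' + 1) with hsufDef
    have hs : s = pre ++ 'x' :: suf := pvSplit s h
    have hnp : 'x' ∉ pre := pvNotMemTakeIdxOf s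
    set R := (PySem.List.enumerate suf ((pre.length : Int) + 1)).filterMap pvIdxFun with hRdef
    have hIdxs : pvIdxs s = ((pre.length : Int)) :: R := by
      rw [hs]
      unfold pvIdxs
      rw [pvIdxs_split 0 pre suf hnp, hRdef]
      simp
    have hI0 : pvIdxs (pre ++ '0' :: suf) = R := by
      unfold pvIdxs
      rw [pvIdxs_split_b 0 pre suf hnp '0' (by decide), hRdef]
      simp
    have hI1 : pvIdxs (pre ++ '1' :: suf) = R := by
      unfold pvIdxs
      rw [pvIdxs_split_b 0 pre suf hnp '1' (by decide), hRdef]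
      simp
    have hplace : ∀ (b : Char) (c : List Char),
        pvPlace s ((pre.length : Int) :: R) (b :: c) = pvPlace (pre ++ b :: suf) R c := by
      intro b c
      rw [pvPlace_cons]
      congr 1
      conv_lhs => rw [hs]
      exact pvSet_at pre suf 'x' b
    rw [pvMain (pre ++ '0' :: suf), pvMain (pre ++ '1' :: suf), hI0, hI1, hIdxs,
        pvCombos_eq, pvCombos_eq, List.length_cons, pvAllCons,
        List.map_append, List.map_map, List.map_map]
    congr 1
    · refine List.map_congr_left (fun c _ => ?_)
      exact (hplace '0' c).symm
    · refine List.map_congr_left (fun c _ => ?_)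
      exact (hplace '1' c).symm
  · rw [pvFloatNumber, dif_neg h]
    have hi : pvIdxs s = [] := by
      unfold pvIdxs
      exact pvIdxs_no_x 0 s h
    rw [hi]
    rfl
termination_by s.count 'x'
decreasing_by
  · exact pvCount_lt s h '0' (by decide)
  · exact pvCount_lt s h '1' (by decide)

-- ===== VERDICT (by name: the statement is the Claim_ definition above) =====
theorem mask_number_with_float_spec : Claim_equal_mask_number_with_float := by
  intro number mask _ _
  unfold Spec_mask_number_with_float mask_number_with_float mask_number_with_float_alt
  rw [pvMaskedA_eq, ← pvMaskedB_eq, pvMain, List.map_map]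
  rfl
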